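-- pv_equiv track=rewrite | github.com/AymenGa/network-scanner | scanner.py | sanitize_banner
-- ===== SOURCE A (Python) =====
-- import string
--
-- def sanitize_banner(raw: str, max_len: int = 200) -> str:
--     """Make a banner printable and reasonably short for CLI display."""
--     if not raw:
--         return ""
--     # Replace non-printable chars with a space
--     printable = ''.join(ch if ch in string.printable else ' ' for ch in raw)
--     # Collapse multiple whitespace
--     printable = ' '.join(printable.split())
--     if len(printable) > max_len:
--         return printable[:max_len-3] + '...'
--     return printable
-- ===== SOURCE B (Python) =====
-- import string
--
-- def sanitize_banner(raw: str, max_len: int = 200) -> str: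
--     """Single pass: fuse sanitizing and whitespace collapsing with a pending-separator flag."""
--     if not raw:
--         return ""
--     out = []
--     pending = False
--     for ch in raw:
--         if ch.isspace() or ch not in string.printable:
--             pending = True
--         else:
--             if pending and out:
--                 out.append(' ')
--             out.append(ch)
--             pending = False
--     s = ''.join(out)
--     if len(s) > max_len:
--         return s[:max_len-3] + '...'
--     return s
-- ===== Notes on version B (the rewrite author's own statement) =====
-- stated objective: alternative
-- what changed: Replaces A's two-pass pipeline (build a sanitized copy, then split and rejoin on single spaces) by one fused pass over raw with a pending-separator flag that emits collapsed words directly; it trades the library split/join for an explicit single loop.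
import Mathlib
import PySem

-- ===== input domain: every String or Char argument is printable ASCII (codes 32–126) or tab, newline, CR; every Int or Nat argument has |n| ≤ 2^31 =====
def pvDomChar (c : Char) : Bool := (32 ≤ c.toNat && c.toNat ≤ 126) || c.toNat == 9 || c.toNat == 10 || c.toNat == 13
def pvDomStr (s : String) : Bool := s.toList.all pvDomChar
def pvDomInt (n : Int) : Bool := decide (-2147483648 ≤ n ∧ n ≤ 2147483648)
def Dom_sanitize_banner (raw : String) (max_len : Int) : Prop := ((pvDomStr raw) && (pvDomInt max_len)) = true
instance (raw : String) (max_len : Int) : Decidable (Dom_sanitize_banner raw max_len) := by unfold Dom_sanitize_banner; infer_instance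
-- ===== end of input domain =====

-- B fuses A's sanitize pass and the split/join whitespace collapse into a single pass with a
-- pending-separator flag (objective: alternative single-loop decomposition, same cost).

-- string.printable (shared module-level constant both implementations consult)
def pvPrintable : List Char :=
  "0123456789abcdefghijklmnopqrstuvwxyzABCDEFGHIJKLMNOPQRSTUVWXYZ!\"#$%&'()*+,-./:;<=>?@[\\]^_`{|}~ \t\n\r\x0B\x0C".toList

-- ===== PORT A =====
def sanitize_banner (raw : String) (max_len : Int) : String :=
  if raw.toList = [] then "" else
  let printable := raw.toList.map (fun ch => if ch ∈ pvPrintable then ch else ' ')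
  let printable2 := PySem.Chars.join [' '] (PySem.Chars.split₀ printable)
  if (printable2.length : Int) > max_len then
    String.ofList (PySem.List.slice printable2 none (some (max_len - 3)) ++ ['.', '.', '.'])
  else
    String.ofList printable2

-- ===== PORT B =====
-- one loop step of Source B: separator chars set the pending flag, word chars are emitted
-- (preceded by one space when a separator is pending and output already exists)
def pvSanStep (st : List Char × Bool) (ch : Char) : List Char × Bool :=
  if PySem.Chars.isspace ch = true ∨ ch ∉ pvPrintable then (st.1, true)
  else if st.2 = true ∧ st.1 ≠ [] then (st.1 ++ [' ', ch], false)
  else (st.1 ++ [ch], false)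

def sanitize_banner_alt (raw : String) (max_len : Int) : String :=
  if raw.toList = [] then "" else
  let s := (raw.toList.foldl pvSanStep ([], false)).1
  if (s.length : Int) > max_len then
    String.ofList (PySem.List.slice s none (some (max_len - 3)) ++ ['.', '.', '.'])
  else
    String.ofList s

-- ===== PRECONDITION & SPEC =====
def Spec_sanitize_banner (raw : String) (max_len : Int) (out : String) : Prop := out = sanitize_banner_alt raw max_len
instance (raw : String) (max_len : Int) (out : String) : Decidable (Spec_sanitize_banner raw max_len out) := by unfold Spec_sanitize_banner; infer_instance

-- ===== CLAIM (what is proved, stated in full; the proofs are below) =====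
def Claim_equal_sanitize_banner : Prop := ∀ (raw : String) (max_len : Int), Dom_sanitize_banner raw max_len → Spec_sanitize_banner raw max_len (sanitize_banner raw max_len)

-- ===== LEMMAS AND PROOFS =====

-- A's replacement of a char, as a function
def pvFix (ch : Char) : Char := if ch ∈ pvPrintable then ch else ' '

-- B's separator test coincides with 'isspace after A's replacement'
lemma pvSep_eq (ch : Char) :
    PySem.Chars.isspace (pvFix ch) = true ↔ (PySem.Chars.isspace ch = true ∨ ch ∉ pvPrintable) := by
  unfold pvFix
  by_cases h : ch ∈ pvPrintable <;> simp [h]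
  · decide

-- join: appending one more part at the end
lemma pvJoin_append_singleton (sep y : List Char) (xs : List (List Char)) :
    PySem.Chars.join sep (xs ++ [y]) =
      (if xs = [] then y else PySem.Chars.join sep xs ++ sep ++ y) := by
  induction xs with
  | nil => simp [PySem.Chars.join_singleton]
  | cons x xs ih =>
    cases xs with
    | nil => simp [PySem.Chars.join_cons_cons, PySem.Chars.join_singleton]
    | cons z zs =>
      simp only [List.cons_append]
      rw [PySem.Chars.join_cons_cons]
      simp only [List.cons_append] at ih
      rw [ih]
      simp [PySem.Chars.join_cons_cons]

lemma pvJoin_ne_nil (sep w : List Char) (l : List (List Char)) (hw : w ≠ []) :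
    PySem.Chars.join sep (w :: l) ≠ [] := by
  cases l with
  | nil => simpa [PySem.Chars.join_singleton]
  | cons z zs => simp [PySem.Chars.join_cons_cons, hw]

-- extending the last word by one char
lemma pvJoin_extend (xs : List (List Char)) (y : List Char) (c : Char) :
    PySem.Chars.join [' '] (xs ++ [y ++ [c]]) = PySem.Chars.join [' '] (xs ++ [y]) ++ [c] := by
  rw [pvJoin_append_singleton, pvJoin_append_singleton]
  by_cases h : xs = [] <;> simp [h]

-- starting a fresh word after at least one finished word
lemma pvJoin_space (xs : List (List Char)) (c : Char) (h : xs ≠ []) :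
    PySem.Chars.join [' '] (xs ++ [[c]]) = PySem.Chars.join [' '] xs ++ [' ', c] := by
  rw [pvJoin_append_singleton, if_neg h]
  simp

-- Main invariant lemma: B's fold agrees with A's split-then-join, for any
-- pair of matching intermediate states.
lemma pvCore (s : List Char) : ∀ (cur : List Char) (acc : List (List Char))
    (out : List Char) (pending : Bool),
    (∀ w ∈ acc, w ≠ []) →
    (cur = [] → out = PySem.Chars.join [' '] acc.reverse ∧ (acc ≠ [] → pending = true)) →
    (cur ≠ [] → out = PySem.Chars.join [' '] (acc.reverse ++ [cur.reverse]) ∧ pending = false) →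
    (s.foldl pvSanStep (out, pending)).1
      = PySem.Chars.join [' '] (PySem.Chars.split₀.go (s.map pvFix) cur acc) := by
  induction s with
  | nil =>
    intro cur acc out pending hne h0 h1
    cases cur with
    | nil => simpa [PySem.Chars.split₀.go] using (h0 rfl).1
    | cons c cs =>
      have := (h1 (by simp)).1
      simpa [PySem.Chars.split₀.go] using this
  | cons c s ih =>
    intro cur acc out pending hne h0 h1
    by_cases hsep : PySem.Chars.isspace c = true ∨ c ∉ pvPrintable
    · -- separator char
      have hfix : PySem.Chars.isspace (pvFix c) = true := (pvSep_eq c).2 hsep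
      simp only [List.foldl_cons, List.map_cons, pvSanStep, if_pos hsep,
        PySem.Chars.split₀.go, hfix, if_true]
      cases cur with
      | nil =>
        simp only [List.isEmpty_nil, if_true]
        exact ih [] acc out true hne (fun _ => ⟨(h0 rfl).1, fun _ => rfl⟩) (fun h => absurd rfl h)
      | cons d ds =>
        rw [if_neg (by simp : ¬((d :: ds).isEmpty = true))]
        refine ih [] ((d :: ds).reverse :: acc) out true ?_ (fun _ => ⟨?_, fun _ => rfl⟩)
          (fun h => absurd rfl h)
        · intro w hw
          rcases List.mem_cons.1 hw with hw | hw
          · subst hw; simp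
          · exact hne _ hw
        · have := (h1 (by simp)).1
          simpa using this
    · -- word char: pvFix c = c and it is not whitespace
      have hcP : c ∈ pvPrintable := by
        by_cases h : c ∈ pvPrintable
        · exact h
        · exact absurd (Or.inr h) hsep
      have hns : ¬ PySem.Chars.isspace c = true := fun h => hsep (Or.inl h)
      have hfix : pvFix c = c := by simp [pvFix, hcP]
      simp only [List.foldl_cons, List.map_cons, pvSanStep, if_neg hsep,
        PySem.Chars.split₀.go, hfix, if_neg hns]
      cases cur with
      | nil =>
        obtain ⟨hout, hpend⟩ := h0 rfl
        cases acc with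
        | nil =>
          -- out is empty: no space inserted either way
          have hout' : out = [] := by rw [hout]; simp [PySem.Chars.join_nil]
          have hcond : ¬ (pending = true ∧ out ≠ []) := by simp [hout']
          simp only [if_neg hcond]
          refine ih [c] [] (out ++ [c]) false (by simp) (by simp) (fun _ => ⟨?_, rfl⟩)
          rw [hout']
          simp [PySem.Chars.join_singleton]
        | cons w ws =>
          have hpend' : pending = true := hpend (by simp)
          have houtne : out ≠ [] := by
            rw [hout]
            have hrev : (w :: ws).reverse ≠ [] := by simp
            obtain ⟨v, vs, hv⟩ := List.exists_cons_of_ne_nil hrev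
            rw [hv]
            exact pvJoin_ne_nil [' '] v vs (by
              intro hvnil
              exact hne v (by rw [← List.mem_reverse, hv]; simp) hvnil)
          have hcond : pending = true ∧ out ≠ [] := ⟨hpend', houtne⟩
          simp only [if_pos hcond]
          refine ih [c] (w :: ws) (out ++ [' ', c]) false hne (by simp) (fun _ => ⟨?_, rfl⟩)
          rw [hout]
          simp only [List.reverse_cons, List.reverse_nil, List.nil_append]
          rw [pvJoin_space (ws.reverse ++ [w]) c (by simp)]
      | cons d ds =>
        obtain ⟨hout, hpend⟩ := h1 (by simp)
        have hcond : ¬ (pending = true ∧ out ≠ []) := by simp [hpend]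
        simp only [if_neg hcond]
        refine ih (c :: d :: ds) acc (out ++ [c]) false hne (by simp) (fun _ => ⟨?_, rfl⟩)
        rw [hout]
        simp only [List.reverse_cons]
        rw [show ds.reverse ++ [d] ++ [c] = (ds.reverse ++ [d]) ++ [c] from rfl,
            pvJoin_extend acc.reverse (ds.reverse ++ [d]) c]

-- the two normalized strings coincide
lemma pvNorm_eq (l : List Char) :
    (l.foldl pvSanStep ([], false)).1
      = PySem.Chars.join [' '] (PySem.Chars.split₀ (l.map pvFix)) := by
  have := pvCore l [] [] [] false (by simp) (fun _ => by simp [PySem.Chars.join, List.intercalate])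
    (fun h => absurd rfl h)
  simpa [PySem.Chars.split₀] using this

-- ===== VERDICT (by name: the statement is the Claim_ definition above) =====
theorem sanitize_banner_spec : Claim_equal_sanitize_banner := by
  intro raw max_len _
  unfold Spec_sanitize_banner sanitize_banner sanitize_banner_alt
  by_cases h : raw.toList = []
  · simp [h]
  · simp only [if_neg h]
    rw [pvNorm_eq raw.toList]
    rfl
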